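-- pv_equiv track=rewrite | github.com/owais-ch/Arrays | completing_tasks.py | solve
-- ===== SOURCE A (Python) =====
-- from collections import Counter
--
-- def solve(arr, n, m):
--
--     dict1=Counter(arr)
--     count=0
--     list1,list2=[],[]
--     for i in range(1,n+1):
--         if i not in dict1:
--             if count%2==0:
--                 list1.append(i)
--             else:
--                 list2.append(i)
--             count+=1
--
--
--     return list1,list2
--
--
--
--     count=0
--     list1=[]
--     list2=[]
--     arr=list(set(arr))
--     arr.sort()
--     j=0
--     length=len(arr)
--     for i in range(1,n+1):
--         if j<length and arr[j]==i:
--             j+=1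
--         else:
--             count+=1
--             if count%2!=0:
--                 list1.append(i)
--             else:
--                 list2.append(i)
--
--     return list1,list2
-- ===== SOURCE B (Python) =====
-- def solve(arr, n, m):
--     present = set(arr)
--     missing = [i for i in range(1, n + 1) if i not in present]
--     return missing[::2], missing[1::2]
-- ===== Notes on version B (the rewrite author's own statement) =====
-- stated objective: simpler
-- what changed: Replaces A's interleaving loop with a parity counter by a build-then-split decomposition: one comprehension collects the missing numbers, then stride slices [::2]/[1::2] produce the two lists.
import Mathlib
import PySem

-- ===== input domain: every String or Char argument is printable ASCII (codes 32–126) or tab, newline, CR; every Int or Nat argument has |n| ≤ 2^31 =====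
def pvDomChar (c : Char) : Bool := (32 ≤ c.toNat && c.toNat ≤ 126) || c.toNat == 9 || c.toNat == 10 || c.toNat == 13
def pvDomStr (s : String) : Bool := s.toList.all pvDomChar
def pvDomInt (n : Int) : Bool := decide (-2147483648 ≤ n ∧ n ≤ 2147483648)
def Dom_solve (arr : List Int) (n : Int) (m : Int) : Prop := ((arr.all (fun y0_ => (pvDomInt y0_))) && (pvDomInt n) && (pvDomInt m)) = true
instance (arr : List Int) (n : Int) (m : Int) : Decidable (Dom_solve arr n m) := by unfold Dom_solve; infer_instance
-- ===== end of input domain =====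

-- B replaces A's interleaving loop with a build-then-split decomposition (collect missing, then stride-slice); objective: simpler.

-- ===== PORT A =====
def solve (arr : List Int) (n : Int) (m : Int) : List Int × List Int :=
  let dict1 := PySem.Dict.counter arr
  let st := (PySem.List.pyRange 1 (n + 1) 1).foldl
    (fun (s : Int × List Int × List Int) i =>
      if !(dict1.contains i) then
        if PySem.Int.mod s.1 2 == 0 then (s.1 + 1, s.2.1 ++ [i], s.2.2)
        else (s.1 + 1, s.2.1, s.2.2 ++ [i])
      else s)
    (0, [], [])
  (st.2.1, st.2.2)

-- ===== PORT B =====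
def solve_alt (arr : List Int) (n : Int) (m : Int) : List Int × List Int :=
  let present := PySem.Set.ofList arr
  let missing := (PySem.List.pyRange 1 (n + 1) 1).filter (fun i => !(present.contains i))
  ((PySem.List.slice? missing none none 2).getD [], (PySem.List.slice? missing (some 1) none 2).getD [])

-- ===== PRECONDITION & SPEC =====
def Spec_solve (arr : List Int) (n : Int) (m : Int) (out : List Int × List Int) : Prop := out = solve_alt arr n m
instance (arr : List Int) (n : Int) (m : Int) (out : List Int × List Int) : Decidable (Spec_solve arr n m out) := by unfold Spec_solve; infer_instance

-- ===== CLAIM (what is proved, stated in full; the proofs are below) =====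
def Claim_equal_solve : Prop := ∀ (arr : List Int) (n : Int) (m : Int), Dom_solve arr n m → Spec_solve arr n m (solve arr n m)

-- ===== LEMMAS AND PROOFS =====

-- elements at even / odd positions
def pvEvens : List Int → List Int
  | [] => []
  | [a] => [a]
  | a :: _ :: t => a :: pvEvens t

def pvOdds : List Int → List Int
  | [] => []
  | [_] => []
  | _ :: b :: t => b :: pvOdds t

theorem pv_cons_lemmas : ∀ (t : List Int),
    (∀ a : Int, pvEvens (a :: t) = a :: pvOdds t) ∧ (∀ a : Int, pvOdds (a :: t) = pvEvens t) := by
  intro t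
  induction t with
  | nil => exact ⟨fun a => rfl, fun a => rfl⟩
  | cons b t' ih =>
    refine ⟨fun a => ?_, fun a => ?_⟩
    · show a :: pvEvens t' = a :: pvOdds (b :: t')
      rw [ih.2 b]
    · show b :: pvOdds t' = pvEvens (b :: t')
      rw [ih.1 b]

theorem pvEvens_cons (a : Int) (t : List Int) : pvEvens (a :: t) = a :: pvOdds t :=
  (pv_cons_lemmas t).1 a

theorem pvOdds_cons (a : Int) (t : List Int) : pvOdds (a :: t) = pvEvens t :=
  (pv_cons_lemmas t).2 a

theorem pv_fmod2 (a : Int) : Int.fmod a 2 = a % 2 := by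
  rw [Int.fmod_eq_emod]; simp

theorem pv_mod2_flip (c : Int) :
    (PySem.Int.mod (c + 1) 2 == 0) = !(PySem.Int.mod c 2 == 0) := by
  simp only [PySem.Int.mod, pv_fmod2]
  rcases Int.emod_two_eq c with hc | hc
  · have h1 : (c + 1) % 2 = 1 := by omega
    simp [hc, h1]
  · have h1 : (c + 1) % 2 = 0 := by omega
    simp [hc, h1]

-- the interleaving fold of A, characterised
theorem pv_fold_interleave (xs : List Int) : ∀ (c : Int) (l1 l2 : List Int),
    xs.foldl (fun (s : Int × List Int × List Int) i =>
        if PySem.Int.mod s.1 2 == 0 then (s.1 + 1, s.2.1 ++ [i], s.2.2)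
        else (s.1 + 1, s.2.1, s.2.2 ++ [i])) (c, l1, l2)
    = (c + xs.length,
       l1 ++ (if PySem.Int.mod c 2 == 0 then pvEvens xs else pvOdds xs),
       l2 ++ (if PySem.Int.mod c 2 == 0 then pvOdds xs else pvEvens xs)) := by
  induction xs with
  | nil => intro c l1 l2; simp [pvEvens, pvOdds]
  | cons x t ih =>
    intro c l1 l2
    simp only [List.foldl_cons]
    by_cases h : (PySem.Int.mod c 2 == 0) = true
    · rw [if_pos h, ih (c + 1) (l1 ++ [x]) l2, pv_mod2_flip, h]
      simp only [Bool.not_true, Bool.false_eq_true, if_false,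
        pvEvens_cons, pvOdds_cons, Prod.mk.injEq, List.append_assoc,
        List.singleton_append, List.length_cons]
      refine ⟨by push_cast; ring, rfl, rfl⟩
    · have hf : (PySem.Int.mod c 2 == 0) = false := by simpa using h
      rw [if_neg (by rw [hf]; exact Bool.false_ne_true), ih (c + 1) l1 (l2 ++ [x]),
        pv_mod2_flip, hf]
      simp only [Bool.not_false, if_true, Bool.false_eq_true, if_false,
        pvEvens_cons, pvOdds_cons, Prod.mk.injEq, List.append_assoc,
        List.singleton_append, List.length_cons]
      exact ⟨by push_cast; ring, trivial⟩

-- stride slices [::2] and [1::2], characterised on index-ranges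
theorem pv_filterMap_stride (t : List Int) :
    ((List.range ((t.length + 1) / 2)).filterMap (fun k => t[2 * k]?) = pvEvens t)
    ∧ ((List.range (t.length / 2)).filterMap (fun k => t[2 * k + 1]?) = pvOdds t) := by
  induction t with
  | nil => simp [pvEvens, pvOdds]
  | cons a t ih =>
    constructor
    · have hcount : ((a :: t).length + 1) / 2 = t.length / 2 + 1 := by
        simp only [List.length_cons]; omega
      rw [hcount, List.range_succ_eq_map, List.filterMap_cons, List.filterMap_map]
      have hhead : (a :: t)[2 * 0]? = some a := by simp
      have hfun : ∀ k : Nat, ((fun k => (a :: t)[2 * k]?) ∘ Nat.succ) k = t[2 * k + 1]? := by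
        intro k
        show (a :: t)[2 * (k + 1)]? = t[2 * k + 1]?
        have h2 : 2 * (k + 1) = (2 * k + 1) + 1 := by omega
        rw [h2, List.getElem?_cons_succ]
      rw [hhead, List.filterMap_congr (fun k _ => hfun k), ih.2, pvEvens_cons a t]
    · have hcount : (a :: t).length / 2 = (t.length + 1) / 2 := by
        simp only [List.length_cons]
      have hfun : ∀ k : Nat, (a :: t)[2 * k + 1]? = t[2 * k]? := by
        intro k; simp
      rw [hcount, List.filterMap_congr (fun k _ => hfun k), ih.1, pvOdds_cons a t]

theorem pv_slice_evens (xs : List Int) :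
    PySem.List.slice? xs none none 2 = some (pvEvens xs) := by
  simp only [PySem.List.slice?, PySem.List.sliceIndices]
  norm_num
  by_cases h : 0 < xs.length
  · rw [if_pos (by exact_mod_cast h)]
    have hc : (((xs.length : Int) + 2 - 1) / 2).toNat = (xs.length + 1) / 2 := by omega
    rw [hc, ← (pv_filterMap_stride xs).1]
    apply List.filterMap_congr
    intro k _
    congr 1
  · cases xs with
    | nil => rfl
    | cons a t => exact absurd (by simp only [List.length_cons]; omega) h

theorem pv_slice_odds (xs : List Int) :
    PySem.List.slice? xs (some 1) none 2 = some (pvOdds xs) := by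
  simp only [PySem.List.slice?, PySem.List.sliceIndices]
  norm_num
  by_cases h : xs = []
  · subst h; norm_num [pvOdds]
  · have hpos : (1 : Int) ≤ (xs.length : Int) := by
      cases xs with
      | nil => exact absurd rfl h
      | cons a t => simp only [List.length_cons]; push_cast; omega
    rw [min_eq_left hpos]
    by_cases h1 : 1 < xs.length
    · rw [if_pos h1]
      have hc : (((xs.length : Int) - 1 + 2 - 1) / 2).toNat = xs.length / 2 := by omega
      rw [hc, ← (pv_filterMap_stride xs).2]
      apply List.filterMap_congr
      intro k _
      congr 1
      omega
    · have hlen : xs.length = 1 := by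
        have : 1 ≤ xs.length := by exact_mod_cast hpos
        omega
      rw [if_neg h1]
      cases xs with
      | nil => exact absurd rfl h
      | cons a t =>
        have ht : t = [] := by
          simp only [List.length_cons] at hlen
          exact List.eq_nil_of_length_eq_zero (by omega)
        subst ht
        norm_num [pvOdds]

theorem pv_contains_eq (arr : List Int) (i : Int) :
    (PySem.Dict.counter arr).contains i = (PySem.Set.ofList arr).contains i := by
  rw [PySem.Dict.contains_counter, PySem.Set.contains_eq_listContains]
  simp [PySem.Set.mem_ofList]

-- ===== VERDICT (by name: the statement is the Claim_ definition above) =====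
theorem solve_spec : Claim_equal_solve := by
  intro arr n m _
  unfold Spec_solve solve solve_alt
  simp only
  rw [show (fun (s : Int × List Int × List Int) i =>
        if !((PySem.Dict.counter arr).contains i) then
          if PySem.Int.mod s.1 2 == 0 then (s.1 + 1, s.2.1 ++ [i], s.2.2)
          else (s.1 + 1, s.2.1, s.2.2 ++ [i])
        else s)
      = (fun (s : Int × List Int × List Int) i =>
        if (fun j => !((PySem.Set.ofList arr).contains j)) i = true then
          (fun (s : Int × List Int × List Int) i =>
            if PySem.Int.mod s.1 2 == 0 then (s.1 + 1, s.2.1 ++ [i], s.2.2)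
            else (s.1 + 1, s.2.1, s.2.2 ++ [i])) s i
        else s) from by
      funext s i; simp [pv_contains_eq]]
  rw [← List.foldl_filter, pv_fold_interleave, pv_slice_evens, pv_slice_odds]
  simp [PySem.Int.mod, pv_fmod2]
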